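-- pv_equiv track=rewrite | github.com/dhennessy/adventofcode2024 | aoc2024/07.py | permute_list2
-- ===== SOURCE A (Python) =====
-- def permute_list2(numbers: list[int]):
--     last = numbers[-1]
--     if len(numbers) == 1:
--         yield last
--     else:
--         for n in permute_list2(numbers[:-1]):
--             yield last + n
--             yield last * n
-- ===== SOURCE B (Python) =====
-- def permute_list2(numbers: list[int]):
--     results = [numbers[0]]
--     for x in numbers[1:]:
--         results = [v for r in results for v in (r + x, r * x)]
--     yield from results
-- ===== Notes on version B (the rewrite author's own statement) =====
-- stated objective: alternative
-- what changed: Replaces right-to-left recursion on numbers[:-1] with an iterative left-to-right accumulation of all partial results (correct by commutativity of + and *).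
import Mathlib
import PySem

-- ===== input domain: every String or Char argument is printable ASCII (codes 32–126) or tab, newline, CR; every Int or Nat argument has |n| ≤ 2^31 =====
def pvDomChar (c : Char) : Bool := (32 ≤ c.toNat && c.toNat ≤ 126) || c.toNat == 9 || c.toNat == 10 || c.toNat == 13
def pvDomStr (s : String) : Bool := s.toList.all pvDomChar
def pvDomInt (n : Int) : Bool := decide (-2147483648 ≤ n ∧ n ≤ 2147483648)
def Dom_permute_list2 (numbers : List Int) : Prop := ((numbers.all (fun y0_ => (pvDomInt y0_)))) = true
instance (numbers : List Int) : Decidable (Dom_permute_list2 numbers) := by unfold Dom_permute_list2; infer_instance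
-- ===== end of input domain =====

-- B replaces A's right-to-left recursion with an iterative left-to-right accumulation
-- of partial results; equal output by commutativity of + and * on Int.

-- ===== PORT A =====
def permute_list2 (numbers : List Int) : List Int :=
  match h : PySem.List.pyGet? numbers (-1) with
  | none => []          -- numbers[-1] raises IndexError; excluded by Pre_
  | some last =>
    if numbers.length == 1 then [last]
    else (permute_list2 (PySem.List.slice numbers none (some (-1)))).flatMap
      (fun n => [last + n, last * n])
termination_by numbers.length
decreasing_by
  cases numbers with
  | nil => simp [PySem.List.pyGet?] at h
  | cons a l => simp [PySem.List.slice_to_neg_one]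

-- ===== PORT B =====
def permute_list2_alt (numbers : List Int) : List Int :=
  match numbers with
  | [] => []            -- numbers[0] raises IndexError; excluded by Pre_
  | x0 :: rest =>
    rest.foldl (fun results x => results.flatMap (fun r => [r + x, r * x])) [x0]

-- ===== PRECONDITION & SPEC =====
-- Pre_ excludes only the empty list, on which Python A raises IndexError (numbers[-1]).
def Pre_permute_list2 (numbers : List Int) : Prop := numbers ≠ []
instance (numbers : List Int) : Decidable (Pre_permute_list2 numbers) := by
  unfold Pre_permute_list2; infer_instance
def pvWitness_permute_list2 : List Int := [2, 3, 5]

def Spec_permute_list2 (numbers : List Int) (out : List Int) : Prop := out = permute_list2_alt numbers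
instance (numbers : List Int) (out : List Int) : Decidable (Spec_permute_list2 numbers out) := by unfold Spec_permute_list2; infer_instance

-- ===== CLAIM (what is proved, stated in full; the proofs are below) =====
def Claim_equal_permute_list2 : Prop := ∀ (numbers : List Int), Dom_permute_list2 numbers → Pre_permute_list2 numbers → Spec_permute_list2 numbers (permute_list2 numbers)

-- ===== LEMMAS AND PROOFS =====

theorem permute_list2_singleton (x : Int) : permute_list2 [x] = [x] := by
  rw [permute_list2]
  split
  · rename_i h; simp [PySem.List.pyGet?_neg_one] at h
  · rename_i last h; simp [PySem.List.pyGet?_neg_one] at h; simp [h]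

theorem permute_list2_snoc (m : List Int) (y : Int) (hm : m ≠ []) :
    permute_list2 (m ++ [y]) = (permute_list2 m).flatMap (fun n => [y + n, y * n]) := by
  conv_lhs => rw [permute_list2]
  rw [PySem.List.pyGet?_neg_one_append_singleton]
  have hlen : ((m ++ [y]).length == 1) = false := by
    simp only [List.length_append, List.length_singleton, beq_eq_false_iff_ne]
    have : m.length ≠ 0 := by simpa using hm
    omega
  simp only [hlen, Bool.false_eq_true, if_false, PySem.List.slice_to_neg_one, List.dropLast_concat]

theorem permute_list2_eq_foldl (rest : List Int) (x0 : Int) :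
    permute_list2 (x0 :: rest) =
      rest.foldl (fun results x => results.flatMap (fun r => [r + x, r * x])) [x0] := by
  induction rest using List.reverseRecOn with
  | nil => exact permute_list2_singleton x0
  | append_singleton l y ih =>
    have h : x0 :: (l ++ [y]) = (x0 :: l) ++ [y] := by simp
    rw [h, permute_list2_snoc (x0 :: l) y (by simp), ih, List.foldl_append]
    simp only [List.foldl]
    congr 1
    funext n
    rw [Int.add_comm, Int.mul_comm]

-- ===== VERDICT (by name: the statement is the Claim_ definition above) =====
theorem permute_list2_spec : Claim_equal_permute_list2 := by
  intro numbers _ hpre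
  unfold Spec_permute_list2
  cases numbers with
  | nil => exact absurd rfl hpre
  | cons x0 rest =>
    rw [permute_list2_eq_foldl]
    rfl
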